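-- pv_equiv track=rewrite | github.com/rphlo/py-retricon | retricon/retricon.py | fill_pixels_vert_sym
-- ===== SOURCE A (Python) =====
-- import math
--
-- def fill_pixels_vert_sym(raw, dimension):
--     mid = int(math.ceil(dimension / 2.0))
--     odd = dimension % 2 != 0
--     pic = [None] * dimension
--     for row in range(dimension):
--         pic[row] = [None] * dimension
--         for col in range(dimension):
--             if col < mid:
--                 ii = row * mid + col
--             else:
--                 dist_middle = mid - col
--                 if odd:
--                     dist_middle -= 1
--                 dist_middle = abs(dist_middle)
--                 ii = row * mid + mid - 1 - dist_middle
--             pic[row][col] = raw['pixels'][ii]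
--     return pic
-- ===== SOURCE B (Python) =====
-- def fill_pixels_vert_sym(raw, dimension):
--     mid = -(-dimension // 2)
--     pic = []
--     for row in range(dimension):
--         s = raw['pixels'][row * mid : row * mid + mid]
--         half = s[:-1] if dimension % 2 else s
--         pic.append(s + half[::-1])
--     return pic
-- ===== Notes on version B (the rewrite author's own statement) =====
-- stated objective: simpler
-- what changed: B builds each row by slicing the mid-wide half-row once and appending its reversal (dropping the center cell when dimension is odd), instead of A's per-cell branch that computes a mirrored index via dist_middle for every column.
import Mathlib
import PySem

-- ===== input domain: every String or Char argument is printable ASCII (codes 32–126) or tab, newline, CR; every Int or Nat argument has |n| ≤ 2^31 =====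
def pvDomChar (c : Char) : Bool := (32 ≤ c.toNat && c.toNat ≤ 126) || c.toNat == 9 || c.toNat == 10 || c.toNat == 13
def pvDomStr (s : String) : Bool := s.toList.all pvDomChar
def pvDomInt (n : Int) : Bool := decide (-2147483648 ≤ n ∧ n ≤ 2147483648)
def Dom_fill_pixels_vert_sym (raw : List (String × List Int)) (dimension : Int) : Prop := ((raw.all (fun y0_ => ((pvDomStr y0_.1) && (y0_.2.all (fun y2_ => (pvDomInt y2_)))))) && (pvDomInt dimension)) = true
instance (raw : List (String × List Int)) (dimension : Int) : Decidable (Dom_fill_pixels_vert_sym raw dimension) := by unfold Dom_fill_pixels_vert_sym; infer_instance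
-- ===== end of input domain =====

-- B mirrors a whole half-row slice per row instead of computing a per-cell mirrored index: simpler decomposition, same cost.
-- Pre_ excludes inputs on which A raises (missing 'pixels' key or a pixel list shorter than dimension*mid, IndexError/KeyError).


-- ===== PORT A =====
-- literal transliteration; int(math.ceil(d/2.0)) is ported as -((-d)//2), exact for |d| ≤ 2^31
def fill_pixels_vert_sym (raw : List (String × List Int)) (dimension : Int) : List (List Int) :=
  let mid : Int := -(PySem.Int.floordiv (-dimension) 2)
  let odd : Bool := PySem.Int.mod dimension 2 != 0
  let pixels : List Int := ((PySem.Dict.mk raw).get? "pixels").getD []   -- raw['pixels']; Pre_ guarantees the key exists when accessed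
  (PySem.List.pyRange 0 dimension 1).map (fun row =>
    (PySem.List.pyRange 0 dimension 1).map (fun col =>
      let ii : Int :=
        if col < mid then row * mid + col
        else
          let dist_middle := mid - col
          let dist_middle := if odd then dist_middle - 1 else dist_middle
          let dist_middle := |dist_middle|
          row * mid + mid - 1 - dist_middle
      PySem.List.pyGetD pixels ii 0))   -- raw['pixels'][ii]; Pre_ guarantees the index is in range

-- ===== PORT B =====
def fill_pixels_vert_sym_alt (raw : List (String × List Int)) (dimension : Int) : List (List Int) :=
  let mid : Int := -(PySem.Int.floordiv (-dimension) 2)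
  (PySem.List.pyRange 0 dimension 1).map (fun row =>
    let s := PySem.List.slice (((PySem.Dict.mk raw).get? "pixels").getD []) (some (row * mid)) (some (row * mid + mid))
    let half := if PySem.Int.mod dimension 2 != 0 then PySem.List.slice s none (some (-1)) else s
    s ++ ((PySem.List.slice? half none none (-1)).getD []))

-- ===== PRECONDITION & SPEC =====
-- Pre_: either the loop never runs (dimension ≤ 0), or raw has a 'pixels' entry long enough for every
-- index A reads (dimension * ceil(dimension/2) values); A raises KeyError/IndexError otherwise.
def Pre_fill_pixels_vert_sym (raw : List (String × List Int)) (dimension : Int) : Prop :=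
  dimension ≤ 0 ∨
    (((PySem.Dict.mk raw).get? "pixels").isSome = true ∧
      dimension * (-(PySem.Int.floordiv (-dimension) 2)) ≤ ((((PySem.Dict.mk raw).get? "pixels").getD []).length : Int))
instance (raw : List (String × List Int)) (dimension : Int) : Decidable (Pre_fill_pixels_vert_sym raw dimension) := by unfold Pre_fill_pixels_vert_sym; infer_instance
def pvWitness_fill_pixels_vert_sym : (List (String × List Int)) × Int := ([("pixels", [1, 2, 3, 4, 5, 6])], 3)

def Spec_fill_pixels_vert_sym (raw : List (String × List Int)) (dimension : Int) (out : List (List Int)) : Prop := out = fill_pixels_vert_sym_alt raw dimension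
instance (raw : List (String × List Int)) (dimension : Int) (out : List (List Int)) : Decidable (Spec_fill_pixels_vert_sym raw dimension out) := by unfold Spec_fill_pixels_vert_sym; infer_instance

-- ===== CLAIM (what is proved, stated in full; the proofs are below) =====
def Claim_equal_fill_pixels_vert_sym : Prop := ∀ (raw : List (String × List Int)) (dimension : Int), Dom_fill_pixels_vert_sym raw dimension → Pre_fill_pixels_vert_sym raw dimension → Spec_fill_pixels_vert_sym raw dimension (fill_pixels_vert_sym raw dimension)

-- ===== LEMMAS AND PROOFS =====


theorem row_eq (p : List Int) (mid d row : Int) (odd : Bool)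
    (hd : 0 < d) (hr0 : 0 ≤ row) (hr : row < d) (hmid : 0 < mid)
    (hrel : d + (if odd then 1 else 0) = 2 * mid)
    (hlen : d * mid ≤ (p.length : Int)) :
    (PySem.List.pyRange 0 d 1).map (fun col =>
        PySem.List.pyGetD p
          (if col < mid then row * mid + col
           else row * mid + mid - 1 - |(if odd then mid - col - 1 else mid - col)|) 0)
      = List.take mid.toNat (List.drop (row * mid).toNat p)
        ++ ((if odd then (List.take mid.toNat (List.drop (row * mid).toNat p)).dropLast
             else List.take mid.toNat (List.drop (row * mid).toNat p)).reverse) := by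
  have hrm : 0 ≤ row * mid := mul_nonneg hr0 (le_of_lt hmid)
  have hstep : row * mid + mid ≤ d * mid := by nlinarith
  have hlenN : (row * mid).toNat + mid.toNat ≤ p.length := by omega
  have hslen : (List.take mid.toNat (List.drop (row * mid).toNat p)).length = mid.toNat := by
    simp [List.length_take, List.length_drop]; omega
  apply List.ext_getElem
  · simp [PySem.List.length_pyRange_one, hslen]
    cases odd <;> simp at hrel ⊢ <;> omega
  · intro k hk1 hk2
    simp only [PySem.List.length_pyRange_one, List.length_map, Int.sub_zero] at hk1
    rw [List.getElem_map, PySem.List.getElem_pyRange_one]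
    have hkd : (k : Int) < d := by omega
    by_cases hkm : (k : Int) < mid
    · rw [if_pos (by omega), List.getElem_append_left (by omega)]
      rw [PySem.List.pyGetD_eq_getElem p 0 (by omega) (by omega)]
      rw [List.getElem_take, List.getElem_drop]
      congr 1; omega
    · rw [if_neg (by omega)]
      rw [List.getElem_append_right (by omega)]
      rw [List.getElem_reverse]
      cases odd
      · simp only [Bool.false_eq_true, if_false] at hrel ⊢
        rw [abs_of_nonpos (by omega)]
        rw [PySem.List.pyGetD_eq_getElem p 0 (by omega) (by omega)]
        simp only [List.getElem_take, List.getElem_drop]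
        congr 1; omega
      · simp only [if_true] at hrel ⊢
        rw [abs_of_nonpos (by omega)]
        rw [PySem.List.pyGetD_eq_getElem p 0 (by omega) (by omega)]
        simp only [List.getElem_dropLast, List.getElem_take, List.getElem_drop, List.length_dropLast]
        congr 1; omega


-- ===== VERDICT (by name: the statement is the Claim_ definition above) =====
theorem fill_pixels_vert_sym_spec : Claim_equal_fill_pixels_vert_sym := by
  intro raw d _ hpre
  unfold Spec_fill_pixels_vert_sym fill_pixels_vert_sym fill_pixels_vert_sym_alt
  dsimp only
  by_cases hd : d <= 0
  · rw [PySem.List.pyRange_one_eq_nil hd]; rfl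
  · push Not at hd
    rcases hpre with h | ⟨hkey, hlen⟩
    · omega
    set p := ((PySem.Dict.mk raw).get? "pixels").getD [] with hp
    set mid := -(PySem.Int.floordiv (-d) 2) with hm
    have hfd : PySem.Int.floordiv (-d) 2 = (-d) / 2 := PySem.Int.floordiv_eq_ediv_of_pos (by omega)
    have hmid : 0 < mid := by rw [hm, hfd]; omega
    set odd := (PySem.Int.mod d 2 != 0) with ho
    have hrel : d + (if odd then 1 else 0) = 2 * mid := by
      rw [ho, hm, hfd, PySem.Int.mod_eq_emod_of_pos (by omega : (0:Int) < 2)]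
      rcases Int.emod_two_eq_zero_or_one d with h2 | h2 <;> simp [h2] <;> omega
    apply List.map_congr_left
    intro row hrow
    rw [PySem.List.mem_pyRange_one] at hrow
    rw [PySem.List.slice_toNat p (mul_nonneg hrow.1 hmid.le) (by nlinarith)]
    have htn : (row * mid + mid).toNat - (row * mid).toNat = mid.toNat := by
      have : 0 ≤ row * mid := mul_nonneg hrow.1 hmid.le
      omega
    rw [htn, PySem.List.slice_to_neg_one, PySem.List.slice?_none_none_neg_one, Option.getD_some]
    exact row_eq p mid d row odd hd hrow.1 hrow.2 hmid hrel hlen
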